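-- pv_equiv track=rewrite | github.com/umm-dev/Symphony | symphony_alpha.py | _match_quality
-- ===== SOURCE A (Python) =====
-- from typing import Awaitable, Callable, Literal, Optional
--
-- def _match_quality(needle: str, fields: list[str]) -> Optional[int]:
--     if any(field == needle for field in fields):
--         return 0
--     if any(field.startswith(needle) for field in fields):
--         return 1
--     if any(needle in field for field in fields):
--         return 2
--     return None
-- ===== SOURCE B (Python) =====
-- def _match_quality(needle, fields):
--     best = None
--     for field in fields:
--         if field == needle:
--             return 0
--         if field.startswith(needle):
--             score = 1
--         elif needle in field:
--             score = 2
--         else: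
--             continue
--         if best is None or score < best:
--             best = score
--     return best
-- ===== Notes on version B (the rewrite author's own statement) =====
-- stated objective: simpler
-- what changed: Replaces three sequential any()-scans over fields with a single pass that keeps a running minimum score (0 returns immediately), so fields is traversed once instead of up to three times.
import Mathlib
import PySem

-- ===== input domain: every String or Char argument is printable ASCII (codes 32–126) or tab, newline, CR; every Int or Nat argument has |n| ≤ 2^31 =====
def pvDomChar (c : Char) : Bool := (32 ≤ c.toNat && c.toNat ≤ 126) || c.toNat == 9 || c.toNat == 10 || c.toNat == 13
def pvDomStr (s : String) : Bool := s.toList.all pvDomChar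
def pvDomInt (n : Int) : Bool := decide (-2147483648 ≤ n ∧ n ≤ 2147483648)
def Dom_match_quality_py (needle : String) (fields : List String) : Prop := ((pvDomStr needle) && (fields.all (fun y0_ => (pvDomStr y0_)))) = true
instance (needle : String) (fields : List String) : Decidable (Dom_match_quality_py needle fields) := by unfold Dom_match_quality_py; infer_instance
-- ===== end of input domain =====

-- B replaces A's three sequential any()-scans with one pass keeping a running minimum score (simpler, single traversal).


-- ===== PORT A =====
def match_quality_py (needle : String) (fields : List String) : Option Int :=
  if fields.any (fun field => field == needle) then some 0
  else if fields.any (fun field => PySem.Str.startswith field needle) then some 1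
  else if fields.any (fun field => PySem.Str.isIn needle field) then some 2
  else none

-- ===== PORT B =====
-- Source B's "if best is None or score < best: best = score" update (scores are compared by <, i.e. a minimum)
def omin : Option Int → Option Int → Option Int
  | none, s => s
  | some b, none => some b
  | some b, some s => some (min b s)

-- the single-pass loop of Source B: returns some 0 on an exact match, otherwise keeps the best score so far
def matchQualityLoop (needle : String) : List String → Option Int → Option Int
  | [], best => best
  | field :: rest, best =>
    if field == needle then some 0
    else
      let score? : Option Int :=
        if PySem.Str.startswith field needle then some 1
        else if PySem.Str.isIn needle field then some 2
        else none
      matchQualityLoop needle rest (omin best score?)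

def match_quality_py_alt (needle : String) (fields : List String) : Option Int :=
  matchQualityLoop needle fields none

-- ===== PRECONDITION & SPEC =====
def Spec_match_quality_py (needle : String) (fields : List String) (out : Option Int) : Prop := out = match_quality_py_alt needle fields
instance (needle : String) (fields : List String) (out : Option Int) : Decidable (Spec_match_quality_py needle fields out) := by unfold Spec_match_quality_py; infer_instance

-- ===== CLAIM (what is proved, stated in full; the proofs are below) =====
def Claim_equal_match_quality_py : Prop := ∀ (needle : String) (fields : List String), Dom_match_quality_py needle fields → Spec_match_quality_py needle fields (match_quality_py needle fields)

-- ===== LEMMAS AND PROOFS =====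

-- the tier (1/2/none) contributed by the prefix/substring scans
def tier (needle : String) (fields : List String) : Option Int :=
  if fields.any (fun field => PySem.Str.startswith field needle) then some 1
  else if fields.any (fun field => PySem.Str.isIn needle field) then some 2
  else none

theorem tier_cases (needle : String) (fields : List String) :
    tier needle fields = none ∨ tier needle fields = some 1 ∨ tier needle fields = some 2 := by
  unfold tier; split_ifs <;> simp

theorem omin_absorb1 (best t : Option Int)
    (h : t = none ∨ t = some 1 ∨ t = some 2) :
    omin (omin best (some 1)) t = omin best (some 1) := by
  rcases h with h | h | h <;> subst h <;> cases best <;> simp [omin]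

theorem omin_absorb2 (best t : Option Int)
    (h : t = none ∨ t = some 2) :
    omin (omin best (some 2)) t = omin best (some 2) := by
  rcases h with h | h <;> subst h <;> cases best <;> simp [omin]

theorem omin_two_one (best : Option Int) :
    omin (omin best (some 2)) (some 1) = omin best (some 1) := by
  cases best <;> simp [omin]

theorem matchQualityLoop_eq (needle : String) (fields : List String) :
    ∀ best : Option Int,
      matchQualityLoop needle fields best =
        if fields.any (fun field => field == needle) then some 0
        else omin best (tier needle fields) := by
  induction fields with
  | nil => intro best; cases best <;> simp [matchQualityLoop, tier, omin]
  | cons f rest ih =>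
    intro best
    by_cases hEq : (f == needle) = true
    · simp [matchQualityLoop, hEq]
    · simp only [matchQualityLoop, List.any_cons, hEq, Bool.false_or, if_false]
      rw [ih]
      by_cases hAny : rest.any (fun field => field == needle) = true
      · simp [hAny]
      · simp only [hAny, if_false, Bool.false_eq_true]
        by_cases hSw : PySem.Str.startswith f needle = true
        · have ht : tier needle (f :: rest) = some 1 := by
            simp only [tier, List.any_cons, hSw, Bool.true_or, if_true]
          rw [if_pos hSw, ht]
          exact omin_absorb1 best _ (tier_cases needle rest)
        · rw [if_neg hSw]
          by_cases hIn : PySem.Str.isIn needle f = true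
          · rw [if_pos hIn]
            by_cases hs : rest.any (fun field => PySem.Str.startswith field needle) = true
            · have ht : tier needle (f :: rest) = some 1 := by
                simp only [tier, List.any_cons, hs, Bool.or_true, if_true]
              have ht' : tier needle rest = some 1 := by
                simp only [tier, hs, if_true]
              rw [ht, ht', omin_two_one]
            · have ht : tier needle (f :: rest) = some 2 := by
                simp only [tier, List.any_cons, hSw, hs, Bool.false_eq_true, if_false,
                  hIn, Bool.true_or, if_true, Bool.false_or]
              rw [ht]
              have ht' : tier needle rest = none ∨ tier needle rest = some 2 := by
                unfold tier
                rw [if_neg hs]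
                split_ifs <;> simp
              exact omin_absorb2 best _ ht'
          · rw [if_neg hIn]
            have ht : tier needle (f :: rest) = tier needle rest := by
              simp only [tier, List.any_cons, hSw, hIn, Bool.false_or, Bool.false_eq_true,
                if_false]
            rw [ht]
            cases best <;> simp [omin]

-- ===== VERDICT (by name: the statement is the Claim_ definition above) =====
theorem match_quality_py_spec : Claim_equal_match_quality_py := by
  intro needle fields _
  unfold Spec_match_quality_py match_quality_py match_quality_py_alt
  rw [matchQualityLoop_eq]
  unfold tier omin
  split_ifs <;> rfl
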